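-- pv_equiv track=rewrite | github.com/BlessedCow/pharmds | app/cli.py | _parse_drug_tokens
-- ===== SOURCE A (Python) =====
-- def _parse_drug_tokens(text: str) -> list[str]:
--     """Parse drug tokens from free-form text.
--
--     Supports:
--     - one drug per line
--     - comma-separated lists
--     - whitespace-separated lists
--     - comments starting with '#'
--     """
--     out: list[str] = []
--     for raw_line in (text or "").splitlines():
--         line = raw_line.split("#", 1)[0].strip()
--         if not line:
--             continue
--
--         # Allow comma-separated values.
--         line = line.replace(",", " ")
--         out.extend([p for p in line.split() if p])
--
--     return out
-- ===== SOURCE B (Python) =====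
-- def _parse_drug_tokens(text: str) -> list[str]:
--     """Single character-level scan: a tiny state machine (current token, comment flag)
--     that emits a token at every separator/comment/newline boundary."""
--     out: list[str] = []
--     cur: list[str] = []
--     comment = False
--     for ch in (text or ""):
--         if ch == "\n" or ch == "\r":
--             if cur:
--                 out.append("".join(cur))
--                 cur = []
--             comment = False
--         elif comment:
--             continue
--         elif ch == "#":
--             if cur:
--                 out.append("".join(cur))
--                 cur = []
--             comment = True
--         elif ch == " " or ch == "\t" or ch == ",":
--             if cur:
--                 out.append("".join(cur))
--                 cur = []
--         else:
--             cur.append(ch)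
--     if cur:
--         out.append("".join(cur))
--     return out
-- ===== Notes on version B (the rewrite author's own statement) =====
-- stated objective: alternative
-- what changed: A splits the text into lines and runs a strip/comment-cut/comma-replace/whitespace-split pipeline on each line; B makes a single character-level pass with a small state machine (pending token + comment flag) that emits tokens at separator, comment and newline boundaries, using no string-splitting functions at all.
import Mathlib
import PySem

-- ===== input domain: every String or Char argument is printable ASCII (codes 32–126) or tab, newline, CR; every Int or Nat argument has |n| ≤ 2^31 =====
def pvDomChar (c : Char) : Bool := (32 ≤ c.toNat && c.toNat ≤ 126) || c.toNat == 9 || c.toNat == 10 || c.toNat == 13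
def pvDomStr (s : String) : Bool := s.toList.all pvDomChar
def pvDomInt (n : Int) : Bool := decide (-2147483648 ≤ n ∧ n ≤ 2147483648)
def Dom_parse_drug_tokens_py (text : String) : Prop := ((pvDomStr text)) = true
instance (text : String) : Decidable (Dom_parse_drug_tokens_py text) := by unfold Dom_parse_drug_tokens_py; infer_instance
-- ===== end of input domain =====

-- B replaces A's line-splitting pipeline (splitlines / strip / split('#') / replace / split)
-- with a single character-level state-machine pass (current token + comment flag); objective: alternative.

-- ===== PORT A =====
-- for raw_line in (text or "").splitlines(): line = raw_line.split('#',1)[0].strip();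
-- if not line: continue; line = line.replace(',',' '); out.extend([p for p in line.split() if p])
def parse_drug_tokens_py (text : String) : List String :=
  let t := if text = "" then "" else text          -- (text or "")
  let out : List (List Char) :=
    (PySem.Chars.splitlines t.toList).foldl (fun out raw_line =>
      -- raw_line.split('#', 1)[0] : split always yields at least one piece, so [0] never raises
      let line := PySem.Chars.strip ((PySem.Chars.splitOnMax raw_line ['#'] 1).headD [])
      if line.isEmpty then out
      else
        let line := PySem.Chars.replace line [','] [' ']
        out ++ (PySem.Chars.split₀ line).filter (fun p => !p.isEmpty)) []
  out.map String.ofList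

-- ===== PORT B =====
-- one pass over the characters: cur = pending token, comment = inside a '#' comment;
-- newline/CR flush cur and reset comment; ' ', tab, ',' flush cur; '#' flushes and starts a comment
def parse_drug_tokens_py_alt (text : String) : List String :=
  let t := if text = "" then "" else text          -- (text or "")
  let fin := t.toList.foldl (fun (st : List String × List Char × Bool) ch =>
      let out := st.1
      let cur := st.2.1
      let comment := st.2.2
      if ch = '\n' ∨ ch = '\r' then
        (if cur.isEmpty then out else out ++ [String.ofList cur], [], false)
      else if comment then (out, cur, comment)
      else if ch = '#' then
        (if cur.isEmpty then out else out ++ [String.ofList cur], [], true)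
      else if ch = ' ' ∨ ch = '\t' ∨ ch = ',' then
        (if cur.isEmpty then out else out ++ [String.ofList cur], [], comment)
      else (out, cur ++ [ch], comment)) ([], [], false)
  if fin.2.1.isEmpty then fin.1 else fin.1 ++ [String.ofList fin.2.1]

-- ===== PRECONDITION & SPEC =====
def Spec_parse_drug_tokens_py (text : String) (out : List String) : Prop := out = parse_drug_tokens_py_alt text
instance (text : String) (out : List String) : Decidable (Spec_parse_drug_tokens_py text out) := by unfold Spec_parse_drug_tokens_py; infer_instance

-- ===== CLAIM (what is proved, stated in full; the proofs are below) =====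
def Claim_equal_parse_drug_tokens_py : Prop := ∀ (text : String), Dom_parse_drug_tokens_py text → Spec_parse_drug_tokens_py text (parse_drug_tokens_py text)

-- ===== LEMMAS AND PROOFS =====

-- proof-side helpers --------------------------------------------------------

-- the comma→space substitution A's replace performs
def pvSub (c : Char) : Char := if c = ',' then ' ' else c

-- the line-break test splitlines uses, as a named function
def pvIsB (c : Char) : Bool :=
  decide (c.toNat = 10) || decide (c.toNat = 13) || decide (c.toNat = 11) || decide (c.toNat = 12) ||
    decide (c.toNat = 28) || decide (c.toNat = 29) || decide (c.toNat = 30) || decide (c.toNat = 133) ||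
    decide (c.toNat = 8232) || decide (c.toNat = 8233)

def pvFlush (cur : List Char) : List (List Char) := if cur.isEmpty then [] else [cur]

-- the character-level machine B runs, as pure structural recursion (tokens as char lists)
def pvDfa : List Char → List Char → Bool → List (List Char)
  | [], cur, _ => pvFlush cur
  | c :: cs, cur, comment =>
    if c = '\n' ∨ c = '\r' then pvFlush cur ++ pvDfa cs [] false
    else if comment then pvDfa cs cur comment
    else if c = '#' then pvFlush cur ++ pvDfa cs [] true
    else if c = ' ' ∨ c = '\t' ∨ c = ',' then pvFlush cur ++ pvDfa cs [] comment
    else pvDfa cs (cur ++ [c]) comment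

-- what A extracts from one line, after strip/filter removal
def pvLineTok (raw : List Char) : List (List Char) :=
  PySem.Chars.split₀ (((PySem.Chars.splitOnMax raw ['#'] 1).headD []).map pvSub)

theorem splitlines_eq_go (s : List Char) :
    PySem.Chars.splitlines s = PySem.Chars.splitlines.go pvIsB s [] [] := rfl

theorem char_eq_iff_toNat {c d : Char} : c = d ↔ c.toNat = d.toNat := by
  constructor
  · intro h; rw [h]
  · intro h; exact Char.ext (by
      have := h
      unfold Char.toNat at this
      exact UInt32.toNat_inj.mp this)

-- character classification on the domain
theorem pvIsB_dom {c : Char} (hc : pvDomChar c = true) (h10 : c ≠ '\n') (h13 : c ≠ '\r') :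
    pvIsB c = false := by
  have h10' : c.toNat ≠ 10 := fun h => h10 (char_eq_iff_toNat.mpr h)
  have h13' : c.toNat ≠ 13 := fun h => h13 (char_eq_iff_toNat.mpr h)
  simp only [pvDomChar, Bool.or_eq_true, Bool.and_eq_true, decide_eq_true_eq, beq_iff_eq] at hc
  simp only [pvIsB, Bool.or_eq_false_iff, decide_eq_false_iff_not]
  omega

theorem pvIsB_true_dom {c : Char} (hc : pvDomChar c = true) (h : pvIsB c = true) :
    c = '\n' ∨ c = '\r' := by
  by_cases h10 : c = '\n'
  · exact Or.inl h10
  by_cases h13 : c = '\r'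
  · exact Or.inr h13
  rw [pvIsB_dom hc h10 h13] at h
  exact absurd h (by simp)

theorem isspace_dom_false {c : Char} (hc : pvDomChar c = true)
    (h10 : c ≠ '\n') (h13 : c ≠ '\r') (hsp : c ≠ ' ') (htb : c ≠ '\t') :
    PySem.Chars.isspace c = false := by
  have h10' : c.toNat ≠ 10 := fun h => h10 (char_eq_iff_toNat.mpr h)
  have h13' : c.toNat ≠ 13 := fun h => h13 (char_eq_iff_toNat.mpr h)
  have h32' : c.toNat ≠ 32 := fun h => hsp (char_eq_iff_toNat.mpr h)
  have h9' : c.toNat ≠ 9 := fun h => htb (char_eq_iff_toNat.mpr h)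
  simp only [pvDomChar, Bool.or_eq_true, Bool.and_eq_true, decide_eq_true_eq, beq_iff_eq] at hc
  simp only [PySem.Chars.isspace, Bool.or_eq_false_iff, Bool.and_eq_false_iff, decide_eq_false_iff_not]
  omega

-- splitOnMax: the first piece of  raw.split('#', 1)  is the prefix of raw before the first '#'
theorem splitOnMax_go_m0 (fuel : Nat) (l cur : List Char) (acc : List (List Char)) :
    PySem.Chars.splitOnMax.go ['#'] fuel 0 l cur acc = ((cur.reverse ++ l) :: acc).reverse := by
  cases fuel with
  | zero => simp [PySem.Chars.splitOnMax.go]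
  | succ f => cases l <;> simp [PySem.Chars.splitOnMax.go]

theorem splitOnMax_go_head : ∀ (fuel : Nat) (l cur : List Char), l.length < fuel →
    ∃ tail, PySem.Chars.splitOnMax.go ['#'] fuel 1 l cur []
      = (cur.reverse ++ l.takeWhile (· ≠ '#')) :: tail := by
  intro fuel
  induction fuel with
  | zero => intro l cur h; omega
  | succ f ih =>
    intro l cur h
    cases l with
    | nil => exact ⟨[], by simp [PySem.Chars.splitOnMax.go]⟩
    | cons c rest =>
      by_cases hc : c = '#'
      · subst hc
        refine ⟨[('#' :: rest).drop 1], ?_⟩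
        rw [show PySem.Chars.splitOnMax.go ['#'] (f + 1) 1 ('#' :: rest) cur []
              = PySem.Chars.splitOnMax.go ['#'] f 0 (('#' :: rest).drop 1) [] [cur.reverse] by
            simp [PySem.Chars.splitOnMax.go, List.isPrefixOf]]
        rw [splitOnMax_go_m0]
        simp [List.takeWhile]
      · obtain ⟨tail, htail⟩ := ih rest (c :: cur) (by simpa using h)
        refine ⟨tail, ?_⟩
        rw [show PySem.Chars.splitOnMax.go ['#'] (f + 1) 1 (c :: rest) cur []
              = PySem.Chars.splitOnMax.go ['#'] f 1 rest (c :: cur) [] by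
            simp [PySem.Chars.splitOnMax.go, List.isPrefixOf]
            intro h'; exact absurd h'.symm hc]
        rw [htail]
        simp [List.takeWhile, hc]

theorem frag_eq (raw : List Char) :
    (PySem.Chars.splitOnMax raw ['#'] 1).headD [] = raw.takeWhile (· ≠ '#') := by
  obtain ⟨tail, htail⟩ := splitOnMax_go_head (raw.length + 1) raw [] (by omega)
  simp [PySem.Chars.splitOnMax, htail]

-- str.replace with single-char arguments is a character map
theorem replace_go_single (o n : Char) : ∀ (fuel : Nat) (l : List Char) (acc : List Char),
    l.length ≤ fuel →
    PySem.Chars.replace.go [o] [n] fuel l acc = acc.reverse ++ l.map (fun c => if c = o then n else c) := by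
  intro fuel
  induction fuel with
  | zero =>
    intro l acc h
    cases l with
    | nil => simp [PySem.Chars.replace.go]
    | cons c t => simp at h
  | succ f ih =>
    intro l acc h
    cases l with
    | nil => simp [PySem.Chars.replace.go]
    | cons c t =>
      by_cases hc : c = o
      · subst hc
        rw [show PySem.Chars.replace.go [c] [n] (f+1) (c :: t) acc
              = PySem.Chars.replace.go [c] [n] f t ([n].reverse ++ acc) by
            simp [PySem.Chars.replace.go, List.isPrefixOf]]
        rw [ih t _ (by simpa using h)]
        simp
      · rw [show PySem.Chars.replace.go [o] [n] (f+1) (c :: t) acc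
              = PySem.Chars.replace.go [o] [n] f t (c :: acc) by
            simp [PySem.Chars.replace.go, List.isPrefixOf]
            intro h'; exact absurd h'.symm hc]
        rw [ih t _ (by simpa using h)]
        simp [hc]

theorem replace_single (o n : Char) (cs : List Char) :
    PySem.Chars.replace cs [o] [n] = cs.map (fun c => if c = o then n else c) := by
  simpa [PySem.Chars.replace] using replace_go_single o n cs.length cs [] le_rfl

-- the accumulator of split₀.go only prefixes the result
theorem split0_go_acc : ∀ (s cur : List Char) (acc : List (List Char)),
    PySem.Chars.split₀.go s cur acc = acc.reverse ++ PySem.Chars.split₀.go s cur [] := by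
  intro s
  induction s with
  | nil => intro cur acc; simp [PySem.Chars.split₀.go]; split <;> simp
  | cons c rest ih =>
    intro cur acc
    simp only [PySem.Chars.split₀.go]
    split
    · split
      · rw [ih [] acc]
      · rw [ih [] (cur.reverse :: acc), ih [] [cur.reverse]]; simp
    · rw [ih (c :: cur) acc]

-- whitespace split distributes over an interior whitespace character
theorem split0_append_space {m : Char} (hm : PySem.Chars.isspace m = true) (a b : List Char) :
    PySem.Chars.split₀ (a ++ m :: b) = PySem.Chars.split₀ a ++ PySem.Chars.split₀ b := by
  have key : ∀ (a : List Char) (cur : List Char) (acc : List (List Char)),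
      PySem.Chars.split₀.go (a ++ m :: b) cur acc
        = PySem.Chars.split₀.go b [] ((PySem.Chars.split₀.go a cur acc).reverse) := by
    intro a
    induction a with
    | nil =>
      intro cur acc
      simp only [List.nil_append, PySem.Chars.split₀.go, hm, if_true]
      split <;> simp
    | cons c t ih =>
      intro cur acc
      simp only [List.cons_append, PySem.Chars.split₀.go]
      split
      · split
        · rw [ih]
        · rw [ih]
      · rw [ih]
  rw [PySem.Chars.split₀, PySem.Chars.split₀, PySem.Chars.split₀, key,
      split0_go_acc b [] ((PySem.Chars.split₀.go a [] []).reverse)]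
  simp

theorem split0_cons_space {c : Char} (hc : PySem.Chars.isspace c = true) (s : List Char) :
    PySem.Chars.split₀ (c :: s) = PySem.Chars.split₀ s := by
  simp [PySem.Chars.split₀, PySem.Chars.split₀.go, hc]

theorem split0_all_space {t : List Char} (h : ∀ c ∈ t, PySem.Chars.isspace c = true) :
    PySem.Chars.split₀ t = [] := by
  induction t with
  | nil => simp [PySem.Chars.split₀, PySem.Chars.split₀.go]
  | cons c t ih =>
    rw [split0_cons_space (h c (by simp))]
    exact ih (fun x hx => h x (by simp [hx]))

theorem split0_space_prefix {t : List Char} (h : ∀ c ∈ t, PySem.Chars.isspace c = true) (u : List Char) :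
    PySem.Chars.split₀ (t ++ u) = PySem.Chars.split₀ u := by
  induction t with
  | nil => simp
  | cons c t ih =>
    rw [List.cons_append, split0_cons_space (h c (by simp))]
    exact ih (fun x hx => h x (by simp [hx]))

theorem split0_space_suffix {t : List Char} (h : ∀ c ∈ t, PySem.Chars.isspace c = true) (u : List Char) :
    PySem.Chars.split₀ (u ++ t) = PySem.Chars.split₀ u := by
  cases t with
  | nil => simp
  | cons c t =>
    rw [split0_append_space (h c (by simp)),
        split0_all_space (t := t) (fun x hx => h x (List.mem_cons_of_mem _ hx))]
    simp

-- split₀ never produces an empty word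
theorem split0_no_empty (s : List Char) : ∀ w ∈ PySem.Chars.split₀ s, w ≠ [] := by
  have key : ∀ (s cur : List Char) (acc : List (List Char)),
      (∀ w ∈ acc, w ≠ []) → ∀ w ∈ PySem.Chars.split₀.go s cur acc, w ≠ [] := by
    intro s
    induction s with
    | nil =>
      intro cur acc hacc w hw
      simp only [PySem.Chars.split₀.go] at hw
      split at hw
      · exact hacc w (by simpa using hw)
      · rcases (by simpa using hw : w ∈ acc ∨ w = cur.reverse) with h | h
        · exact hacc w h
        · subst h
          rename_i hne
          simp only [List.isEmpty_iff] at hne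
          simpa using hne
    | cons c t ih =>
      intro cur acc hacc w hw
      simp only [PySem.Chars.split₀.go] at hw
      split at hw
      · split at hw
        · exact ih [] acc hacc w hw
        · refine ih [] (cur.reverse :: acc) ?_ w hw
          intro v hv
          rcases List.mem_cons.mp hv with h | h
          · subst h
            rename_i hne
            simp only [List.isEmpty_iff] at hne
            simpa using hne
          · exact hacc v h
      · exact ih (c :: cur) acc hacc w hw
  exact key s [] [] (by simp)

theorem split0_filter_no_empty (s : List Char) :
    (PySem.Chars.split₀ s).filter (fun p => !p.isEmpty) = PySem.Chars.split₀ s := by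
  refine List.filter_eq_self.mpr (fun w hw => ?_)
  simpa [List.isEmpty_iff] using split0_no_empty s w hw

-- a character map that fixes every whitespace character commutes with strip w.r.t. split₀
theorem split0_map_strip (sub : Char → Char)
    (hsp : ∀ c, PySem.Chars.isspace c = true → sub c = c) (f : List Char) :
    PySem.Chars.split₀ ((PySem.Chars.strip f).map sub) = PySem.Chars.split₀ (f.map sub) := by
  have hpre : f.map sub
      = (f.takeWhile PySem.Chars.isspace).map sub ++ (PySem.Chars.lstrip f).map sub := by
    rw [← List.map_append]
    congr 1
    exact (List.takeWhile_append_dropWhile).symm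
  have hlstrip : PySem.Chars.split₀ ((PySem.Chars.lstrip f).map sub)
      = PySem.Chars.split₀ (f.map sub) := by
    rw [hpre, split0_space_prefix]
    intro c hc
    rcases List.mem_map.mp hc with ⟨d, hd, hdc⟩
    have hsd := List.mem_takeWhile_imp hd
    rw [← hdc, hsp d hsd]; exact hsd
  have hrstrip : ∀ x : List Char,
      PySem.Chars.split₀ ((PySem.Chars.rstrip x).map sub) = PySem.Chars.split₀ (x.map sub) := by
    intro x
    have hx : x.map sub = (PySem.Chars.rstrip x).map sub
        ++ ((x.reverse.takeWhile PySem.Chars.isspace).reverse).map sub := by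
      rw [← List.map_append]
      congr 1
      conv_lhs => rw [show x = (x.reverse.dropWhile PySem.Chars.isspace).reverse
          ++ (x.reverse.takeWhile PySem.Chars.isspace).reverse by
        rw [← List.reverse_append, List.takeWhile_append_dropWhile]
        · simp]
      simp [PySem.Chars.rstrip]
    rw [hx, split0_space_suffix]
    intro c hc
    rcases List.mem_map.mp hc with ⟨d, hd, hdc⟩
    have hsd := List.mem_takeWhile_imp (List.mem_reverse.mp hd)
    rw [← hdc, hsp d hsd]; exact hsd
  rw [PySem.Chars.strip, hrstrip, hlstrip]

-- 'if skip: continue else extend' fold is a flatMap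
theorem foldl_if_skip {α β : Type} (c : α → Bool) (h : α → List β) (l : List α) :
    l.foldl (fun out x => if c x then out else out ++ h x) []
      = l.flatMap (fun x => if c x then [] else h x) := by
  have hfun : (fun (out : List β) x => if c x then out else out ++ h x)
      = fun out x => out ++ (if c x then [] else h x) := by
    funext out x; by_cases hc : c x <;> simp [hc]
  rw [hfun, PySem.List.foldl_append_eq_flatMap]
  simp

-- a run of non-whitespace characters is a single token
theorem split0_go_nonspace : ∀ (w cur : List Char) (acc : List (List Char)),
    (∀ c ∈ w, PySem.Chars.isspace c = false) →
    PySem.Chars.split₀.go w cur acc = PySem.Chars.split₀.go [] (w.reverse ++ cur) acc := by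
  intro w
  induction w with
  | nil => intro cur acc _; simp
  | cons c t ih =>
    intro cur acc h
    rw [show PySem.Chars.split₀.go (c :: t) cur acc = PySem.Chars.split₀.go t (c :: cur) acc by
      simp only [PySem.Chars.split₀.go, h c (by simp)]
      simp]
    rw [ih (c :: cur) acc (fun x hx => h x (by simp [hx]))]
    simp

theorem split0_token {w : List Char} (hw : w ≠ []) (h : ∀ c ∈ w, PySem.Chars.isspace c = false) :
    PySem.Chars.split₀ w = [w] := by
  rw [PySem.Chars.split₀, split0_go_nonspace w [] [] h]
  simp [PySem.Chars.split₀.go, hw]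

-- splitlines.go: the accumulator only prefixes the result
theorem sl_go_acc : ∀ (n : Nat) (l cur : List Char) (acc : List (List Char)), l.length ≤ n →
    PySem.Chars.splitlines.go pvIsB l cur acc
      = acc.reverse ++ PySem.Chars.splitlines.go pvIsB l cur [] := by
  intro n
  induction n with
  | zero =>
    intro l cur acc h
    have : l = [] := by cases l with | nil => rfl | cons _ _ => simp at h
    subst this
    simp [PySem.Chars.splitlines.go]
    split <;> simp
  | succ n ih =>
    intro l cur acc h
    cases l with
    | nil =>
      simp [PySem.Chars.splitlines.go]
      split <;> simp
    | cons c rest =>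
      by_cases hcr : c = '\r' ∧ ∃ r', rest = '\n' :: r'
      · obtain ⟨hc, r', hr⟩ := hcr
        subst hc; subst hr
        have hgo : ∀ acc', PySem.Chars.splitlines.go pvIsB ('\r' :: '\n' :: r') cur acc'
            = PySem.Chars.splitlines.go pvIsB r' [] (cur.reverse :: acc') :=
          fun _ => by simp [PySem.Chars.splitlines.go]
        rw [hgo acc, hgo [],
            ih r' [] (cur.reverse :: acc) (by simp at h; omega),
            ih r' [] [cur.reverse] (by simp at h; omega)]
        simp
      · have hgo : ∀ acc', PySem.Chars.splitlines.go pvIsB (c :: rest) cur acc'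
            = if pvIsB c then PySem.Chars.splitlines.go pvIsB rest [] (cur.reverse :: acc')
              else PySem.Chars.splitlines.go pvIsB rest (c :: cur) acc' := by
          intro acc'
          cases rest with
          | nil => simp [PySem.Chars.splitlines.go]
          | cons d r' =>
            by_cases hc : c = '\r'
            · have hd : d ≠ '\n' := fun hdn => hcr ⟨hc, r', by rw [hdn]⟩
              subst hc
              simp [PySem.Chars.splitlines.go, hd, pvIsB]
            · simp [PySem.Chars.splitlines.go, hc]
        rw [hgo acc, hgo []]
        by_cases hb : pvIsB c
        · rw [if_pos hb, if_pos hb,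
              ih rest [] (cur.reverse :: acc) (by simpa using h),
              ih rest [] [cur.reverse] (by simpa using h)]
          simp
        · rw [if_neg hb, if_neg hb, ih rest (c :: cur) acc (by simpa using h)]

-- splitlines.go walks through break-free characters by accumulating them
theorem sl_go_line : ∀ (p : List Char), (∀ c ∈ p, pvIsB c = false) →
    ∀ (r cur : List Char) (acc : List (List Char)),
    PySem.Chars.splitlines.go pvIsB (p ++ r) cur acc
      = PySem.Chars.splitlines.go pvIsB r (p.reverse ++ cur) acc := by
  intro p
  induction p with
  | nil => intro _ r cur acc; simp
  | cons c t ih =>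
    intro h r cur acc
    have hc : pvIsB c = false := h c (by simp)
    have hcr : c ≠ '\r' := fun hceq => by subst hceq; exact absurd hc (by decide)
    rw [List.cons_append,
        show PySem.Chars.splitlines.go pvIsB (c :: (t ++ r)) cur acc
          = PySem.Chars.splitlines.go pvIsB (t ++ r) (c :: cur) acc by
        cases htr : t ++ r with
        | nil => simp [PySem.Chars.splitlines.go, hc]
        | cons d r' => simp [PySem.Chars.splitlines.go, hcr, hc]]
    rw [ih (fun x hx => h x (by simp [hx])) r (c :: cur) acc]
    simp

-- the machine ignores a comment up to the end of the line
theorem dfa_comment {q : List Char} (h : ∀ c ∈ q, c ≠ '\n' ∧ c ≠ '\r') :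
    pvDfa q [] true = [] := by
  induction q with
  | nil => rfl
  | cons c t ih =>
    obtain ⟨h10, h13⟩ := h c (by simp)
    rw [show pvDfa (c :: t) [] true = pvDfa t [] true by
      simp [pvDfa, h10, h13]]
    exact ih (fun x hx => h x (by simp [hx]))

-- '#' cuts the rest of the line
theorem dfa_hash : ∀ (p : List Char), (∀ c ∈ p, c ≠ '\n' ∧ c ≠ '\r' ∧ c ≠ '#') →
    ∀ {q : List Char}, (∀ c ∈ q, c ≠ '\n' ∧ c ≠ '\r') → ∀ (cur : List Char),
    pvDfa (p ++ '#' :: q) cur false = pvDfa p cur false := by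
  intro p
  induction p with
  | nil =>
    intro _ q hq cur
    rw [List.nil_append, show pvDfa ('#' :: q) cur false = pvFlush cur ++ pvDfa q [] true by
      simp [pvDfa]]
    rw [dfa_comment hq]
    simp [pvDfa]
  | cons c t ih =>
    intro h q hq cur
    obtain ⟨h10, h13, hh⟩ := h c (by simp)
    have ht := fun x hx => h x (List.mem_cons_of_mem _ hx)
    by_cases hsep : c = ' ' ∨ c = '\t' ∨ c = ','
    · rw [List.cons_append,
          show pvDfa (c :: (t ++ '#' :: q)) cur false = pvFlush cur ++ pvDfa (t ++ '#' :: q) [] false by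
            simp [pvDfa, h10, h13, hh, hsep],
          show pvDfa (c :: t) cur false = pvFlush cur ++ pvDfa t [] false by
            simp [pvDfa, h10, h13, hh, hsep],
          ih ht hq []]
    · rw [List.cons_append,
          show pvDfa (c :: (t ++ '#' :: q)) cur false = pvDfa (t ++ '#' :: q) (cur ++ [c]) false by
            simp [pvDfa, h10, h13, hh, hsep],
          show pvDfa (c :: t) cur false = pvDfa t (cur ++ [c]) false by
            simp [pvDfa, h10, h13, hh, hsep],
          ih ht hq (cur ++ [c])]

-- a line break flushes and resets the machine
theorem dfa_break : ∀ (p : List Char), (∀ c ∈ p, c ≠ '\n' ∧ c ≠ '\r') →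
    ∀ {b : Char}, (b = '\n' ∨ b = '\r') → ∀ (r cur : List Char) (comment : Bool),
    pvDfa (p ++ b :: r) cur comment = pvDfa p cur comment ++ pvDfa r [] false := by
  intro p
  induction p with
  | nil =>
    intro _ b hb r cur comment
    rw [List.nil_append, show pvDfa (b :: r) cur comment = pvFlush cur ++ pvDfa r [] false by
      simp [pvDfa, hb]]
    rfl
  | cons c t ih =>
    intro h b hb r cur comment
    obtain ⟨h10, h13⟩ := h c (by simp)
    have ht := fun x hx => h x (List.mem_cons_of_mem _ hx)
    rw [List.cons_append]
    cases comment with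
    | true =>
      rw [show pvDfa (c :: (t ++ b :: r)) cur true = pvDfa (t ++ b :: r) cur true by
            simp [pvDfa, h10, h13],
          show pvDfa (c :: t) cur true = pvDfa t cur true by
            simp [pvDfa, h10, h13],
          ih ht hb r cur true]
    | false =>
      by_cases hh : c = '#'
      · rw [show pvDfa (c :: (t ++ b :: r)) cur false = pvFlush cur ++ pvDfa (t ++ b :: r) [] true by
              simp [pvDfa, h10, h13, hh],
            show pvDfa (c :: t) cur false = pvFlush cur ++ pvDfa t [] true by
              simp [pvDfa, h10, h13, hh],
            ih ht hb r [] true]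
        simp
      by_cases hsep : c = ' ' ∨ c = '\t' ∨ c = ','
      · rw [show pvDfa (c :: (t ++ b :: r)) cur false = pvFlush cur ++ pvDfa (t ++ b :: r) [] false by
              simp [pvDfa, h10, h13, hh, hsep],
            show pvDfa (c :: t) cur false = pvFlush cur ++ pvDfa t [] false by
              simp [pvDfa, h10, h13, hh, hsep],
            ih ht hb r [] false]
        simp
      · rw [show pvDfa (c :: (t ++ b :: r)) cur false = pvDfa (t ++ b :: r) (cur ++ [c]) false by
              simp [pvDfa, h10, h13, hh, hsep],
            show pvDfa (c :: t) cur false = pvDfa t (cur ++ [c]) false by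
              simp [pvDfa, h10, h13, hh, hsep],
            ih ht hb r (cur ++ [c]) false]

-- core: on a break-free, '#'-free piece of a line the machine computes split₀ of the comma map
theorem dfa_core : ∀ (p : List Char),
    (∀ c ∈ p, pvDomChar c = true ∧ c ≠ '\n' ∧ c ≠ '\r' ∧ c ≠ '#') →
    ∀ (cur : List Char), (∀ c ∈ cur, PySem.Chars.isspace c = false ∧ c ≠ ',') →
    PySem.Chars.split₀ ((cur ++ p).map pvSub) = pvDfa p cur false := by
  intro p
  induction p with
  | nil =>
    intro _ cur hcur
    have hmap : cur.map pvSub = cur := by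
      rw [List.map_congr_left (fun c hc => by simp [pvSub, (hcur c hc).2] : ∀ c ∈ cur, pvSub c = c)]
      exact List.map_id _
    rw [List.append_nil, hmap, show pvDfa [] cur false = pvFlush cur from rfl]
    cases hc : cur with
    | nil => simp [PySem.Chars.split₀, PySem.Chars.split₀.go, pvFlush]
    | cons a t =>
      rw [split0_token (by simp) (fun c hcm => (hcur c (hc ▸ hcm)).1)]
      simp [pvFlush]
  | cons c t ih =>
    intro h cur hcur
    obtain ⟨hdom, h10, h13, hh⟩ := h c (by simp)
    have ht := fun x hx => h x (List.mem_cons_of_mem _ hx)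
    by_cases hsep : c = ' ' ∨ c = '\t' ∨ c = ','
    · have hspc : PySem.Chars.isspace (pvSub c) = true := by
        rcases hsep with h | h | h <;> subst h <;> decide
      rw [show (cur ++ c :: t).map pvSub = cur.map pvSub ++ pvSub c :: t.map pvSub by simp,
          split0_append_space hspc]
      have hfst : PySem.Chars.split₀ (cur.map pvSub) = pvFlush cur := by
        have hmap : cur.map pvSub = cur := by
          rw [List.map_congr_left (fun x hx => by simp [pvSub, (hcur x hx).2] : ∀ x ∈ cur, pvSub x = x)]
          exact List.map_id _
        rw [hmap]
        cases hc : cur with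
        | nil => simp [PySem.Chars.split₀, PySem.Chars.split₀.go, pvFlush]
        | cons a u =>
          rw [split0_token (by simp) (fun x hxm => (hcur x (hc ▸ hxm)).1)]
          simp [pvFlush]
      rw [hfst, show t.map pvSub = (([] : List Char) ++ t).map pvSub by simp,
          ih ht [] (by simp),
          show pvDfa (c :: t) cur false = pvFlush cur ++ pvDfa t [] false by
            simp [pvDfa, h10, h13, hh, hsep]]
    · have hc32 : c ≠ ' ' := fun h => hsep (Or.inl h)
      have hc9 : c ≠ '\t' := fun h => hsep (Or.inr (Or.inl h))
      have hc44 : c ≠ ',' := fun h => hsep (Or.inr (Or.inr h))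
      have hns : PySem.Chars.isspace c = false := isspace_dom_false hdom h10 h13 hc32 hc9
      rw [show cur ++ c :: t = (cur ++ [c]) ++ t by simp,
          ih ht (cur ++ [c]) (by
            intro x hx
            rcases List.mem_append.mp hx with h | h
            · exact hcur x h
            · simp at h; subst h; exact ⟨hns, hc44⟩),
          show pvDfa (c :: t) cur false = pvDfa t (cur ++ [c]) false by
            simp [pvDfa, h10, h13, hh, hsep]]

-- per line: A's strip/'#'-cut/replace/split equals the machine started fresh on the raw line
theorem lineTok_eq_dfa {raw : List Char}
    (hdom : ∀ c ∈ raw, pvDomChar c = true) (hbr : ∀ c ∈ raw, c ≠ '\n' ∧ c ≠ '\r') :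
    pvLineTok raw = pvDfa raw [] false := by
  unfold pvLineTok
  rw [frag_eq]
  have hsplit := (List.takeWhile_append_dropWhile (p := (· ≠ '#')) (l := raw)).symm
  have htake : ∀ c ∈ raw.takeWhile (· ≠ '#'),
      pvDomChar c = true ∧ c ≠ '\n' ∧ c ≠ '\r' ∧ c ≠ '#' := by
    intro c hc
    have hmem : c ∈ raw := (List.takeWhile_prefix _).subset hc
    have hne : c ≠ '#' := by simpa using List.mem_takeWhile_imp hc
    exact ⟨hdom c hmem, (hbr c hmem).1, (hbr c hmem).2, hne⟩
  cases hdrop : raw.dropWhile (· ≠ '#') with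
  | nil =>
    have hraw : raw = raw.takeWhile (· ≠ '#') := by
      conv_lhs => rw [hsplit]
      rw [hdrop, List.append_nil]
    conv_rhs => rw [hraw]
    rw [← dfa_core (raw.takeWhile (· ≠ '#')) htake [] (by simp)]
    simp
  | cons d q =>
    have hd : d = '#' := by
      have := List.head?_dropWhile_not (· ≠ '#') raw
      rw [hdrop] at this
      simpa using this
    subst hd
    have hsuf : '#' :: q <:+ raw := hdrop ▸ List.dropWhile_suffix _
    have hq : ∀ c ∈ q, c ≠ '\n' ∧ c ≠ '\r' := by
      intro c hc
      exact hbr c (hsuf.subset (by simp [hc]))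
    conv_rhs => rw [hsplit, hdrop]
    rw [dfa_hash (raw.takeWhile (· ≠ '#')) (fun c hc => (htake c hc).2) hq []]
    rw [← dfa_core (raw.takeWhile (· ≠ '#')) htake [] (by simp)]
    simp

-- splitlines.go: step lemmas for the terminators, and popping a finished line off the accumulator
theorem sl_go_acc1 (r x : List Char) :
    PySem.Chars.splitlines.go pvIsB r [] [x]
      = x :: PySem.Chars.splitlines.go pvIsB r [] [] := by
  rw [sl_go_acc r.length r [] [x] le_rfl]
  simp

theorem sl_go_crlf (r cur : List Char) (acc : List (List Char)) :
    PySem.Chars.splitlines.go pvIsB ('\r' :: '\n' :: r) cur acc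
      = PySem.Chars.splitlines.go pvIsB r [] (cur.reverse :: acc) := by
  simp [PySem.Chars.splitlines.go]

theorem sl_go_break {b : Char} (hb : pvIsB b = true) {r : List Char}
    (hno : ¬ (b = '\r' ∧ ∃ r', r = '\n' :: r')) (cur : List Char) (acc : List (List Char)) :
    PySem.Chars.splitlines.go pvIsB (b :: r) cur acc
      = PySem.Chars.splitlines.go pvIsB r [] (cur.reverse :: acc) := by
  cases r with
  | nil => simp [PySem.Chars.splitlines.go, hb]
  | cons d r' =>
    by_cases hb13 : b = '\r'
    · have hd : d ≠ '\n' := fun h => hno ⟨hb13, r', by rw [h]⟩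
      subst hb13
      simp [PySem.Chars.splitlines.go, hd, pvIsB]
    · simp [PySem.Chars.splitlines.go, hb13, hb]

-- main bridge: lines → tokens via flatMap equals the machine run over the full text
theorem main_bridge : ∀ (n : Nat) (l : List Char), l.length ≤ n →
    (∀ c ∈ l, pvDomChar c = true) →
    (PySem.Chars.splitlines.go pvIsB l [] []).flatMap pvLineTok = pvDfa l [] false := by
  intro n
  induction n with
  | zero =>
    intro l h _
    have : l = [] := by cases l with | nil => rfl | cons _ _ => simp at h
    subst this
    simp [PySem.Chars.splitlines.go, pvDfa, pvFlush]
  | succ n ih =>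
    intro l hlen hdom
    set p := l.takeWhile (fun c => !pvIsB c) with hp
    have hsplit := (List.takeWhile_append_dropWhile (p := fun c => !pvIsB c) (l := l)).symm
    rw [← hp] at hsplit
    have hpB : ∀ c ∈ p, pvIsB c = false := by
      intro c hc
      have := List.mem_takeWhile_imp (hp ▸ hc)
      rw [Bool.not_eq_true'] at this
      exact this
    have hpmem : ∀ c ∈ p, c ∈ l := fun c hc => (List.takeWhile_prefix _).subset (hp ▸ hc)
    have hpbr : ∀ c ∈ p, c ≠ '\n' ∧ c ≠ '\r' := by
      intro c hc
      constructor
      · intro h; subst h; exact absurd (hpB _ hc) (by decide)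
      · intro h; subst h; exact absurd (hpB _ hc) (by decide)
    have hptok : pvLineTok p = pvDfa p [] false :=
      lineTok_eq_dfa (fun c hc => hdom c (hpmem c hc)) hpbr
    cases hdrop : l.dropWhile (fun c => !pvIsB c) with
    | nil =>
      have hlp : l = p := by
        conv_lhs => rw [hsplit]
        rw [hdrop, List.append_nil]
      have g1 : PySem.Chars.splitlines.go pvIsB l [] []
          = PySem.Chars.splitlines.go pvIsB ([] : List Char) p.reverse [] := by
        conv_lhs => rw [hlp]
        simpa using sl_go_line p hpB [] [] []
      rw [g1, hlp, ← hptok]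
      by_cases hpn : p.isEmpty
      · rw [List.isEmpty_iff.mp hpn]
        simp [PySem.Chars.splitlines.go, pvLineTok, frag_eq, PySem.Chars.split₀,
          PySem.Chars.split₀.go, pvDfa, pvFlush, PySem.Chars.splitOnMax,
          PySem.Chars.splitOnMax.go]
      · rw [show PySem.Chars.splitlines.go pvIsB ([] : List Char) p.reverse [] = [p] by
            simp [PySem.Chars.splitlines.go, hpn]]
        simp
    | cons b r =>
      have hbB : pvIsB b = true := by
        have := List.head?_dropWhile_not (fun c => !pvIsB c) l
        rw [hdrop] at this
        simpa using this
      have hsuf : b :: r <:+ l := hdrop ▸ List.dropWhile_suffix _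
      have hb : b = '\n' ∨ b = '\r' := pvIsB_true_dom (hdom b (hsuf.subset (by simp))) hbB
      have hsplit' : l = p ++ b :: r := by rw [hsplit, hdrop]
      have g1 : PySem.Chars.splitlines.go pvIsB l [] []
          = PySem.Chars.splitlines.go pvIsB (b :: r) p.reverse [] := by
        conv_lhs => rw [hsplit']
        simpa using sl_go_line p hpB (b :: r) [] []
      rcases (em (b = '\r' ∧ ∃ r', r = '\n' :: r')) with hcrlf | hcrlf
      · obtain ⟨hb13, r', hr⟩ := hcrlf
        subst hb13; subst hr
        have hrem_len : r'.length ≤ n := by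
          have : l.length = p.length + (2 + r'.length) := by
            conv_lhs => rw [hsplit']
            simp
            omega
          omega
        have hrdom : ∀ c ∈ r', pvDomChar c = true :=
          fun c hc => hdom c (hsuf.subset (by simp [hc]))
        have g2 : PySem.Chars.splitlines.go pvIsB ('\r' :: '\n' :: r') p.reverse []
            = p :: PySem.Chars.splitlines.go pvIsB r' [] [] := by
          rw [sl_go_crlf, sl_go_acc1]
          simp
        rw [g1, g2, List.flatMap_cons, hptok, ih r' hrem_len hrdom]
        conv_rhs => rw [hsplit']
        rw [dfa_break p hpbr (Or.inr rfl) ('\n' :: r') [] false,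
            show pvDfa ('\n' :: r') [] false = pvFlush [] ++ pvDfa r' [] false by
              simp [pvDfa]]
        simp [pvFlush]
      · have hrem_len : r.length ≤ n := by
          have : l.length = p.length + (1 + r.length) := by
            conv_lhs => rw [hsplit']
            simp
            omega
          omega
        have hrdom : ∀ c ∈ r, pvDomChar c = true :=
          fun c hc => hdom c (hsuf.subset (by simp [hc]))
        have g2 : PySem.Chars.splitlines.go pvIsB (b :: r) p.reverse []
            = p :: PySem.Chars.splitlines.go pvIsB r [] [] := by
          rw [sl_go_break hbB hcrlf, sl_go_acc1]
          simp
        rw [g1, g2, List.flatMap_cons, hptok, ih r hrem_len hrdom]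
        conv_rhs => rw [hsplit']
        rw [dfa_break p hpbr hb r [] false]

-- B's fold is the machine
theorem fold_dfa : ∀ (l : List Char) (out : List String) (cur : List Char) (comment : Bool),
    (let fin := l.foldl (fun (st : List String × List Char × Bool) ch =>
      let out := st.1
      let cur := st.2.1
      let comment := st.2.2
      if ch = '\n' ∨ ch = '\r' then
        (if cur.isEmpty then out else out ++ [String.ofList cur], [], false)
      else if comment then (out, cur, comment)
      else if ch = '#' then
        (if cur.isEmpty then out else out ++ [String.ofList cur], [], true)
      else if ch = ' ' ∨ ch = '\t' ∨ ch = ',' then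
        (if cur.isEmpty then out else out ++ [String.ofList cur], [], comment)
      else (out, cur ++ [ch], comment)) (out, cur, comment)
     if fin.2.1.isEmpty then fin.1 else fin.1 ++ [String.ofList fin.2.1])
    = out ++ (pvDfa l cur comment).map String.ofList := by
  intro l
  induction l with
  | nil =>
    intro out cur comment
    simp only [List.foldl_nil, pvDfa, pvFlush]
    cases hc : cur.isEmpty <;> simp [hc]
  | cons c t ih =>
    intro out cur comment
    simp only [List.foldl_cons]
    by_cases h10 : c = '\n' ∨ c = '\r'
    · rw [show pvDfa (c :: t) cur comment = pvFlush cur ++ pvDfa t [] false by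
        simp [pvDfa, h10]]
      simp only [h10, if_true]
      rw [ih]
      cases hc : cur.isEmpty <;> simp [pvFlush, hc]
    · cases hcm : comment with
      | true =>
        rw [show pvDfa (c :: t) cur true = pvDfa t cur true by simp [pvDfa, h10]]
        simp only [h10, if_false]
        rw [ih]
        simp
      | false =>
        by_cases hh : c = '#'
        · rw [show pvDfa (c :: t) cur false = pvFlush cur ++ pvDfa t [] true by
            simp [pvDfa, h10, hh]]
          simp only [h10, hh, if_false, if_true]
          rw [ih]
          cases hc : cur.isEmpty <;> simp [pvFlush, hc]
        · by_cases hsep : c = ' ' ∨ c = '\t' ∨ c = ','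
          · rw [show pvDfa (c :: t) cur false = pvFlush cur ++ pvDfa t [] false by
              simp [pvDfa, h10, hh, hsep]]
            simp only [h10, hh, hsep, if_false, if_true]
            rw [ih]
            cases hc : cur.isEmpty <;> simp [pvFlush, hc]
          · rw [show pvDfa (c :: t) cur false = pvDfa t (cur ++ [c]) false by
              simp [pvDfa, h10, hh, hsep]]
            simp only [h10, hh, hsep, if_false]
            rw [ih]
            simp

-- ===== VERDICT (by name: the statement is the Claim_ definition above) =====
theorem parse_drug_tokens_py_spec : Claim_equal_parse_drug_tokens_py := by
  intro text hdom
  unfold Spec_parse_drug_tokens_py parse_drug_tokens_py parse_drug_tokens_py_alt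
  have ht : (if text = "" then "" else text) = text := by
    split_ifs with h
    · exact h.symm
    · rfl
  rw [ht]
  have hdomc : ∀ c ∈ text.toList, pvDomChar c = true := by
    intro c hc
    have := hdom
    unfold Dom_parse_drug_tokens_py pvDomStr at this
    exact List.all_eq_true.mp this c hc
  -- B side: fold = machine
  rw [fold_dfa text.toList [] [] false]
  simp only [List.nil_append]
  -- A side
  congr 1
  rw [splitlines_eq_go,
      foldl_if_skip
        (fun raw => (PySem.Chars.strip ((PySem.Chars.splitOnMax raw ['#'] 1).headD [])).isEmpty)
        (fun raw => (PySem.Chars.split₀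
          (PySem.Chars.replace (PySem.Chars.strip ((PySem.Chars.splitOnMax raw ['#'] 1).headD []))
            [','] [' '])).filter (fun p => !p.isEmpty))]
  rw [← main_bridge text.toList.length text.toList le_rfl hdomc]
  refine List.flatMap_congr (fun raw _ => ?_)
  have hsp : ∀ c, PySem.Chars.isspace c = true → pvSub c = c := by
    intro c hc
    have hne : c ≠ ',' := by
      intro h; subst h; exact absurd hc (by decide)
    simp [pvSub, hne]
  have hsub : (fun c => if c = ',' then ' ' else c) = pvSub := by
    funext c; simp [pvSub]
  by_cases he : (PySem.Chars.strip ((PySem.Chars.splitOnMax raw ['#'] 1).headD [])).isEmpty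
  · rw [if_pos he]
    unfold pvLineTok
    rw [← split0_map_strip pvSub hsp]
    rw [List.isEmpty_iff.mp he]
    simp [PySem.Chars.split₀, PySem.Chars.split₀.go]
  · rw [if_neg he, replace_single, split0_filter_no_empty, hsub,
        split0_map_strip pvSub hsp]
    rfl
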